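-- pv_equiv track=rewrite | github.com/brandaorichard/Computer-Science-module | section3-day1/exercises/exercise3.py | count_good_pairs
-- ===== SOURCE A (Python) =====
-- def count_good_pairs(products):
--     count = 0
--     n = len(products)
--     for i in range(n):
--         for j in range(i + 1, n):
--             if products[i] == products[j] and i < j:
--                 count += 1
--     return count
-- ===== SOURCE B (Python) =====
-- def count_good_pairs(products):
--     seen = {}
--     count = 0
--     for x in products:
--         count += seen.get(x, 0)
--         seen[x] = seen.get(x, 0) + 1
--     return count
-- ===== Notes on version B (the rewrite author's own statement) =====
-- stated objective: faster
-- what changed: Replaced the O(n^2) nested index loops with a single pass that keeps a hash map of occurrence counts seen so far and adds the current count of each element as it is scanned.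
import Mathlib
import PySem

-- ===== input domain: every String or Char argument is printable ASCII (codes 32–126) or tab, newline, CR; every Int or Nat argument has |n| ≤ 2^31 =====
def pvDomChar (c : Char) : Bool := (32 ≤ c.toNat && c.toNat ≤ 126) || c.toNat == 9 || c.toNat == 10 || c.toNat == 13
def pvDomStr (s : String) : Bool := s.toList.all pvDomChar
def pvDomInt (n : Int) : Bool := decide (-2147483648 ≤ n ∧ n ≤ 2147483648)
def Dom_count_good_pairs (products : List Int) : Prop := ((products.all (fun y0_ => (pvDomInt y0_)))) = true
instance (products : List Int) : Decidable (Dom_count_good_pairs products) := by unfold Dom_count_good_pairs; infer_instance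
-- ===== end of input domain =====

-- B replaces the O(n^2) nested index loops with a single pass over the list
-- keeping a hash map of occurrence counts seen so far (measurably faster; asymptotic change).

-- ===== PORT A =====
-- literal port of A: nested loops over range(n) / range(i+1, n) with indexing
def count_good_pairs (products : List Int) : Int :=
  let n : Int := (products.length : Int)
  (PySem.List.pyRange 0 n 1).foldl (fun count i =>
    (PySem.List.pyRange (i + 1) n 1).foldl (fun count j =>
      if PySem.List.pyGetD products i 0 = PySem.List.pyGetD products j 0 ∧ i < j then
        count + 1
      else count) count) 0

-- ===== PORT B =====
-- literal port of B: one pass, dict of counts seen so far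
def count_good_pairs_alt (products : List Int) : Int :=
  (products.foldl
    (fun (s : PySem.Dict Int Int × Int) x =>
      (s.1.insert x (s.1.getD x 0 + 1), s.2 + s.1.getD x 0))
    (PySem.Dict.empty, 0)).2

-- ===== PRECONDITION & SPEC =====
def Spec_count_good_pairs (products : List Int) (out : Int) : Prop := out = count_good_pairs_alt products
instance (products : List Int) (out : Int) : Decidable (Spec_count_good_pairs products out) := by unfold Spec_count_good_pairs; infer_instance

-- ===== CLAIM (what is proved, stated in full; the proofs are below) =====
def Claim_equal_count_good_pairs : Prop := ∀ (products : List Int), Dom_count_good_pairs products → Spec_count_good_pairs products (count_good_pairs products)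

-- ===== LEMMAS AND PROOFS =====

-- common spec: number of pairs i < j with equal values, counted at the earlier element
def pc : List Int → Int
  | [] => 0
  | x :: xs => (xs.count x : Int) + pc xs

-- Σ_{y ∈ xs} (1 if y = x else 0) = count of x in xs
theorem sum_ite_eq_count (x : Int) (xs : List Int) :
    (xs.map (fun y => if x = y then (1 : Int) else 0)).sum = (xs.count x : Int) := by
  induction xs with
  | nil => simp
  | cons z zs ih =>
    simp only [List.map_cons, List.sum_cons, ih, List.count_cons]
    by_cases h : x = z
    · simp [h]; ring
    · simp [beq_iff_eq, h, Ne.symm h]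

-- Σ_{y ∈ xs} (count of y in [x]) = count of x in xs
theorem sum_count_singleton (x : Int) (xs : List Int) :
    (xs.map (fun y => (([x].count y : Nat) : Int))).sum = (xs.count x : Int) := by
  rw [← sum_ite_eq_count x xs]
  congr 1
  apply List.map_congr_left
  intro y _
  rw [List.count_singleton]
  split_ifs with h1 h2 h2 <;> simp_all [beq_iff_eq]

-- B's one-pass fold, generalized over a dict that already counts a history h
theorem b_fold_gen (xs : List Int) : ∀ (h : List Int) (d : PySem.Dict Int Int) (c : Int),
    (∀ v : Int, d.getD v 0 = (h.count v : Int)) →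
    (xs.foldl
      (fun (s : PySem.Dict Int Int × Int) x =>
        (s.1.insert x (s.1.getD x 0 + 1), s.2 + s.1.getD x 0))
      (d, c)).2
    = c + (xs.map (fun y => (h.count y : Int))).sum + pc xs := by
  induction xs with
  | nil => intro h d c _; simp [pc]
  | cons x xs ih =>
    intro h d c hd
    rw [List.foldl_cons]; dsimp only
    have h2 : ∀ v : Int, ((d.insert x (d.getD x 0 + 1)).getD v 0) = (((h ++ [x]).count v : Nat) : Int) := by
      intro v
      rw [PySem.Dict.getD_insert, List.count_append]
      by_cases hv : v = x
      · subst hv; simp [hd v]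
      · simp [hv, hd v, Ne.symm hv]
    rw [ih (h ++ [x]) _ _ h2, hd x]
    have hsum : (xs.map (fun y => ((h ++ [x]).count y : Int))).sum
        = (xs.map (fun y => (h.count y : Int))).sum + (xs.count x : Int) := by
      calc (xs.map (fun y => ((h ++ [x]).count y : Int))).sum
          = (xs.map (fun y => (h.count y : Int) + (([x].count y : Nat) : Int))).sum := by
            congr 1
            apply List.map_congr_left
            intro y _
            rw [List.count_append]; push_cast; ring
        _ = (xs.map (fun y => (h.count y : Int))).sum
            + (xs.map (fun y => (([x].count y : Nat) : Int))).sum := List.sum_map_add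
        _ = (xs.map (fun y => (h.count y : Int))).sum + (xs.count x : Int) := by
            rw [sum_count_singleton]
    rw [hsum]
    simp [pc]
    ring

theorem b_eq_pc (products : List Int) : count_good_pairs_alt products = pc products := by
  have h0 : ∀ v : Int, (PySem.Dict.empty : PySem.Dict Int Int).getD v 0 = (([] : List Int).count v : Int) := by
    intro v; simp [PySem.Dict.getD_empty]
  have h := b_fold_gen products [] PySem.Dict.empty 0 h0
  unfold count_good_pairs_alt
  rw [h]
  have hz : (products.map (fun y => ((List.count y ([] : List Int) : Nat) : Int))).sum = 0 := by
    induction products with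
    | nil => simp
    | cons a l ih => simpa using ih
  rw [hz, zero_add, zero_add]

-- A's inner loop counts occurrences of products[a] in the suffix after a
theorem a_inner (products : List Int) (a c : Int) (h0 : 0 ≤ a)
    (_hlt : a < (products.length : Int)) :
    (PySem.List.pyRange (a + 1) (products.length : Int) 1).foldl
      (fun count j =>
        if PySem.List.pyGetD products a 0 = PySem.List.pyGetD products j 0 ∧ a < j then
          count + 1
        else count) c
    = c + (((products.drop (a.toNat + 1)).count (PySem.List.pyGetD products a 0) : Nat) : Int) := by
  have hcongr : (PySem.List.pyRange (a + 1) (products.length : Int) 1).foldl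
      (fun count j =>
        if PySem.List.pyGetD products a 0 = PySem.List.pyGetD products j 0 ∧ a < j then
          count + 1
        else count) c
      = (PySem.List.pyRange (a + 1) (products.length : Int) 1).foldl
        (fun count j =>
          (fun (acc : Int) (y : Int) =>
            if PySem.List.pyGetD products a 0 = y then acc + 1 else acc) count
            (PySem.List.pyGetD products j 0)) c := by
    apply PySem.List.foldl_congr_mem
    intro acc j hj
    have hj' := (PySem.List.mem_pyRange_one).mp hj
    have : a < j := by omega
    simp [this]
  rw [hcongr]
  rw [PySem.List.foldl_pyRange_pyGetD' products 0
    (fun acc y => if PySem.List.pyGetD products a 0 = y then acc + 1 else acc) c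
    (by omega : (0:Int) ≤ a + 1)]
  have ht : (a + 1).toNat = a.toNat + 1 := by omega
  rw [ht, PySem.List.foldl_ite_add_one]
  congr 1
  rw [Int.natCast_inj]
  rw [List.count_eq_countP]
  apply List.countP_congr
  intro y _
  by_cases h : PySem.List.pyGetD products a 0 = y
  · simp [h]
  · simp [beq_iff_eq, h, Ne.symm h]

-- A's outer loop from index a computes pc of the suffix from a
theorem a_outer (products : List Int) : ∀ (k : Nat) (a c : Int), 0 ≤ a →
    ((products.length : Int) - a).toNat = k →
    (PySem.List.pyRange a (products.length : Int) 1).foldl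
      (fun count i =>
        (PySem.List.pyRange (i + 1) (products.length : Int) 1).foldl
          (fun count j =>
            if PySem.List.pyGetD products i 0 = PySem.List.pyGetD products j 0 ∧ i < j then
              count + 1
            else count) count) c
    = c + pc (products.drop a.toNat) := by
  intro k
  induction k with
  | zero =>
    intro a c h0 hk
    have hna : (products.length : Int) ≤ a := by omega
    rw [PySem.List.pyRange_one_eq_nil hna]
    have : products.length ≤ a.toNat := by omega
    rw [List.drop_eq_nil_of_le this]
    simp [pc]
  | succ k ih =>
    intro a c h0 hk
    have hlt : a < (products.length : Int) := by omega
    rw [PySem.List.pyRange_one_cons hlt, List.foldl_cons]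
    rw [a_inner products a c h0 hlt]
    rw [ih (a + 1) _ (by omega) (by omega)]
    have hna : a.toNat < products.length := by omega
    have hget : PySem.List.pyGetD products a 0 = products[a.toNat] :=
      PySem.List.pyGetD_eq_getElem products 0 h0 hlt
    have ht : (a + 1).toNat = a.toNat + 1 := by omega
    rw [ht]
    have hdrop : products.drop a.toNat = products[a.toNat] :: products.drop (a.toNat + 1) :=
      List.drop_eq_getElem_cons hna
    rw [hdrop]
    simp [pc, hget]
    ring

theorem a_eq_pc (products : List Int) : count_good_pairs products = pc products := by
  have h := a_outer products products.length 0 0 le_rfl (by omega)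
  unfold count_good_pairs
  dsimp only
  rw [h, Int.toNat_zero, List.drop_zero, zero_add]

-- ===== VERDICT (by name: the statement is the Claim_ definition above) =====
theorem count_good_pairs_spec : Claim_equal_count_good_pairs := by
  intro products _
  unfold Spec_count_good_pairs
  rw [a_eq_pc, b_eq_pc]
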